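-- pv_equiv track=rewrite | github.com/eliasailenei/UPNHBS | graph.py | get_candidates
-- ===== SOURCE A (Python) =====
-- def get_candidates(binary, N): # get all possible numbers from the binary string
--     length = len(binary) # get the length of the binary string
--     prefix = [0] * (length + 1) # create a list of zeros with length + 1
--     for i in range(length):
--         prefix[i+1] = (prefix[i] << 1) + (1 if binary[i] == '1' else 0) # convert the binary string to decimal
--     candidates = set() # use a set to avoid duplicates
--     for i in range(length): # get all possible numbers from the binary string yk the rest ...
--         for j in range(i+1, length+1):
--             val = prefix[j] - (prefix[i] << (j - i))
--             if val >= N: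
--                 break
--             if val > 1 and (val == 2 or val % 2 != 0):
--                 candidates.add(val)
--     return candidates
-- ===== SOURCE B (Python) =====
-- def get_candidates(binary, N):
--     candidates = set()
--     suffix = list(binary)
--     while suffix:
--         val = 0
--         for ch in suffix:
--             val = (val << 1) + (ch == '1')
--             if val >= N:
--                 break
--             if val > 1 and (val == 2 or val % 2 != 0):
--                 candidates.add(val)
--         suffix = suffix[1:]
--     return candidates
-- ===== Notes on version B (the rewrite author's own statement) =====
-- stated objective: simpler
-- what changed: Replaces A's (length+1)-entry prefix-value array and per-substring shift-subtract lookups with a direct walk over each suffix that maintains a single rolling value val = (val<<1)+bit, so the array and its construction pass disappear.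
import Mathlib
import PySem

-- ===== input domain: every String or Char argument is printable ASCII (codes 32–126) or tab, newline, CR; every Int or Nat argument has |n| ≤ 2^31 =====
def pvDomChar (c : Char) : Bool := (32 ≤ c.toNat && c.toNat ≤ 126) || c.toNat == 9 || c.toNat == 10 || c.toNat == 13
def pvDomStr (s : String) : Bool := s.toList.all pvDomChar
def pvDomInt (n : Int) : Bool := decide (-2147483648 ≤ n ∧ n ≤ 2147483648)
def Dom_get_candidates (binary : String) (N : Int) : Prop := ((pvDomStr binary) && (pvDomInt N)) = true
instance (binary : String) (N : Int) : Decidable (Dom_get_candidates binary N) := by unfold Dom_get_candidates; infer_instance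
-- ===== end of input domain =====

-- B drops A's (length+1)-sized prefix array and shift-subtract lookups: it walks each suffix
-- with a rolling value val = (val<<1)+bit (objective: simpler; same output set, same insertion order).

-- ===== PORT A =====
-- inner 'for j in range(i+1, length+1)' loop with its break, as recursion on j
def pvInnerA (pre : List Int) (N : Int) (length : Nat) (i : Nat) (j : Nat)
    (s : PySem.Set Int) : PySem.Set Int :=
  if length + 1 ≤ j then s
  else
    let val := pre.getD j 0 - (pre.getD i 0) <<< (j - i)
    if val ≥ N then s
    else pvInnerA pre N length i (j+1)
      (if val > 1 ∧ (val = 2 ∨ PySem.Int.mod val 2 ≠ 0) then PySem.Set.add s val else s)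
termination_by length + 1 - j

def get_candidates (binary : String) (N : Int) : List Int :=
  let cs := binary.toList
  let length := cs.length
  -- prefix[i+1] = (prefix[i] << 1) + (1 if binary[i] == '1' else 0); all indices provably in
  -- range, so List.set / List.getD are exact for Python's list assignment / subscript here
  let pre := (List.range length).foldl
    (fun (p : List Int) i => p.set (i+1) ((p.getD i 0) <<< (1:Nat) + (if cs.getD i ' ' = '1' then 1 else 0)))
    (List.replicate (length+1) (0:Int))
  (List.range length).foldl (fun s i => pvInnerA pre N length i (i+1) s) PySem.Set.empty

-- ===== PORT B =====
-- 'for ch in suffix' with its break, as structural recursion on the char list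
def pvInnerB (N : Int) (val : Int) (s : PySem.Set Int) : List Char → PySem.Set Int
  | [] => s
  | c :: rest =>
    let v := (val <<< (1:Nat)) + (if c = '1' then 1 else 0)
    if v ≥ N then s
    else pvInnerB N v (if v > 1 ∧ (v = 2 ∨ PySem.Int.mod v 2 ≠ 0) then PySem.Set.add s v else s) rest

-- 'while suffix: … ; suffix = suffix[1:]'
def pvOuterB (N : Int) (s : PySem.Set Int) : List Char → PySem.Set Int
  | [] => s
  | c :: rest => pvOuterB N (pvInnerB N 0 s (c :: rest)) rest

def get_candidates_alt (binary : String) (N : Int) : List Int :=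
  pvOuterB N PySem.Set.empty binary.toList

-- ===== PRECONDITION & SPEC =====
def Spec_get_candidates (binary : String) (N : Int) (out : List Int) : Prop := out = get_candidates_alt binary N
instance (binary : String) (N : Int) (out : List Int) : Decidable (Spec_get_candidates binary N out) := by unfold Spec_get_candidates; infer_instance

-- ===== CLAIM (what is proved, stated in full; the proofs are below) =====
def Claim_equal_get_candidates : Prop := ∀ (binary : String) (N : Int), Dom_get_candidates binary N → Spec_get_candidates binary N (get_candidates binary N)

-- ===== LEMMAS AND PROOFS =====

-- value of the first k characters (what prefix[k] holds)
def pvNum (cs : List Char) : Int :=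
  cs.foldl (fun a c => (a <<< (1:Nat)) + (if c = '1' then 1 else 0)) 0

theorem pvNum_append_singleton (cs : List Char) (c : Char) :
    pvNum (cs ++ [c]) = (pvNum cs) <<< (1:Nat) + (if c = '1' then 1 else 0) := by
  simp [pvNum, List.foldl_append]

theorem pvNum_take_succ (cs : List Char) (m : Nat) (h : m < cs.length) :
    pvNum (cs.take (m+1)) = (pvNum (cs.take m)) <<< (1:Nat) + (if cs.getD m ' ' = '1' then 1 else 0) := by
  rw [List.take_add_one, List.getElem?_eq_getElem h]
  simp only [Option.toList_some]
  rw [pvNum_append_singleton, List.getD_eq_getElem?_getD, List.getElem?_eq_getElem h]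
  simp

-- invariant of A's prefix-building fold
theorem pvPre_inv (cs : List Char) (m : Nat) (hm : m ≤ cs.length) :
    let p := (List.range m).foldl
      (fun (p : List Int) i => p.set (i+1) ((p.getD i 0) <<< (1:Nat) + (if cs.getD i ' ' = '1' then 1 else 0)))
      (List.replicate (cs.length+1) (0:Int))
    p.length = cs.length + 1 ∧ ∀ k : Nat, k ≤ m → p.getD k 0 = pvNum (cs.take k) := by
  induction m with
  | zero =>
    refine ⟨by simp, ?_⟩
    intro k hk
    interval_cases k
    simp [pvNum]
  | succ m ih =>
    have hm' : m ≤ cs.length := Nat.le_of_succ_le hm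
    obtain ⟨hlen, hval⟩ := ih hm'
    rw [List.range_succ, List.foldl_append]
    refine ⟨by simpa using hlen, ?_⟩
    intro k hk
    simp only [List.foldl_cons, List.foldl_nil]
    rcases Nat.lt_or_ge k (m+1) with hlt | hge
    · rw [List.getD_eq_getElem?_getD, List.getElem?_set_ne (by omega), ← List.getD_eq_getElem?_getD]
      exact hval k (by omega)
    · have hk' : k = m + 1 := by omega
      subst hk'
      rw [List.getD_eq_getElem?_getD, List.getElem?_set_self (by omega)]
      simp only [Option.getD_some]
      rw [hval m (le_refl m), pvNum_take_succ cs m (by omega)]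

-- A's inner loop from index j+1 equals B's inner loop over cs.drop j carrying the substring value
theorem pvInner_eq (cs : List Char) (pre : List Int) (N : Int)
    (hpre : ∀ k : Nat, k ≤ cs.length → pre.getD k 0 = pvNum (cs.take k)) :
    ∀ j i : Nat, i ≤ j → j ≤ cs.length → ∀ s : PySem.Set Int,
      pvInnerA pre N cs.length i (j+1) s =
      pvInnerB N (pvNum (cs.take j) - (pvNum (cs.take i)) <<< (j - i)) s (cs.drop j) := by
  intro j
  induction hd : cs.drop j generalizing j with
  | nil =>
    intro i hij hj s
    have hj' : j = cs.length := by
      have := List.drop_eq_nil_iff.mp hd; omega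
    rw [pvInnerA]
    simp [hj', pvInnerB]
  | cons c rest ih =>
    intro i hij hj s
    have hjlt : j < cs.length := by
      by_contra h
      rw [List.drop_eq_nil_iff.mpr (by omega)] at hd
      simp at hd
    have h1 : cs[j] :: cs.drop (j+1) = c :: rest := by
      rw [← List.drop_eq_getElem_cons hjlt, hd]
    injection h1 with h1a h1b
    have hc : cs.getD j ' ' = c := by
      rw [List.getD_eq_getElem?_getD, List.getElem?_eq_getElem hjlt]
      simp [h1a]
    -- the stepped value
    have hval : pvNum (cs.take (j+1)) - (pvNum (cs.take i)) <<< (j + 1 - i) =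
        (pvNum (cs.take j) - (pvNum (cs.take i)) <<< (j - i)) <<< (1:Nat)
          + (if c = '1' then 1 else 0) := by
      rw [pvNum_take_succ cs j hjlt, hc]
      simp only [Int.shiftLeft_eq]
      rw [show j + 1 - i = (j - i) + 1 from by omega, pow_succ]
      ring
    rw [pvInnerA, if_neg (show ¬ (cs.length + 1 ≤ j + 1) by omega), pvInnerB]
    simp only [hpre (j+1) (by omega), hpre i (by omega), ← hval]
    by_cases hN : pvNum (cs.take (j+1)) - (pvNum (cs.take i)) <<< (j + 1 - i) ≥ N
    · rw [if_pos hN, if_pos hN]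
    · rw [if_neg hN, if_neg hN]
      exact ih (j+1) h1b i (by omega) (by omega) _

-- A's outer fold over range' i m equals B's outer recursion on cs.drop i
theorem pvOuter_eq (cs : List Char) (pre : List Int) (N : Int)
    (hpre : ∀ k : Nat, k ≤ cs.length → pre.getD k 0 = pvNum (cs.take k)) :
    ∀ (m i : Nat), i + m = cs.length → ∀ s : PySem.Set Int,
      (List.range' i m).foldl (fun s i => pvInnerA pre N cs.length i (i+1) s) s =
      pvOuterB N s (cs.drop i) := by
  intro m
  induction m with
  | zero =>
    intro i hi s
    rw [List.drop_eq_nil_iff.mpr (by omega)]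
    simp [pvOuterB]
  | succ m ih =>
    intro i hi s
    have hilt : i < cs.length := by omega
    have hdrop : cs.drop i = cs[i] :: cs.drop (i+1) := List.drop_eq_getElem_cons hilt
    rw [List.range'_succ, List.foldl_cons, hdrop, pvOuterB, ← hdrop]
    rw [ih (i+1) (by omega)]
    congr 1
    have h0 : pvInnerB N 0 s (cs.drop i) =
        pvInnerB N (pvNum (cs.take i) - (pvNum (cs.take i)) <<< (i - i)) s (cs.drop i) := by
      congr 1
      simp [Int.shiftLeft_eq]
    rw [h0, ← pvInner_eq cs pre N hpre i i (le_refl i) (by omega) s]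

-- ===== VERDICT (by name: the statement is the Claim_ definition above) =====
theorem get_candidates_spec : Claim_equal_get_candidates := by
  intro binary N _
  unfold Spec_get_candidates get_candidates get_candidates_alt
  have hpre := pvPre_inv binary.toList binary.toList.length (le_refl _)
  simp only [List.range_eq_range'] at hpre ⊢
  exact pvOuter_eq binary.toList _ N hpre.2 binary.toList.length 0 (by omega) PySem.Set.empty
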